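-- pv_equiv track=rewrite | github.com/ariosty/coursera | POC_part2/word_wrangler.py | gen_all_strings
-- ===== SOURCE A (Python) =====
-- def gen_all_strings(word):
--     """
--     Generate all strings that can be composed from the letters in word
--     in any order.
--
--     Returns a list of all strings that can be formed from the letters
--     in word.
--
--     This function should be recursive.
--     """
--     if ("" == word):
--         return [""]
--     first = word[0]
--     rest = word[1:]
--     rest_strings = gen_all_strings(rest)
--     result = list(rest_strings)
--     for string in rest_strings:
--         length = len(string)
--         for idx in range(length + 1):
--             result.append(string[:idx] + first + string[idx:])
--     return result
-- ===== SOURCE B (Python) =====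
-- def gen_all_strings(word):
--     """Iterative bottom-up version: fold the characters of word in reverse
--     order, extending the collection with every insertion of the character."""
--     current = [""]
--     for ch in reversed(word):
--         current = current + [s[:i] + ch + s[i:]
--                              for s in current
--                              for i in range(len(s) + 1)]
--     return current
-- ===== Notes on version B (the rewrite author's own statement) =====
-- stated objective: alternative
-- what changed: Replaces A's top-down recursion (peel first char, recurse on the rest, then append insertions) by an explicit bottom-up loop: start from [""] and fold the characters of word in reverse order, extending the list with a single comprehension of insertions per character.
import Mathlib
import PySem

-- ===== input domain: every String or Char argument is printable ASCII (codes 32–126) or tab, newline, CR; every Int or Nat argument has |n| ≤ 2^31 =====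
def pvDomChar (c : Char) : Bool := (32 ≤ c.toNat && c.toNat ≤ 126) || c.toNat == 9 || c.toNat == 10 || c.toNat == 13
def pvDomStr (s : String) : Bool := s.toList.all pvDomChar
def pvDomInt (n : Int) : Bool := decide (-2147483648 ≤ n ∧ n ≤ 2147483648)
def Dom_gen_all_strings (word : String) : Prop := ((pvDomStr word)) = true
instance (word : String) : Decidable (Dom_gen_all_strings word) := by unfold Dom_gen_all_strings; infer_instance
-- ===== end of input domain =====

-- B replaces A's recursion by a bottom-up loop over reversed(word) with a single comprehension per character (objective: alternative decomposition, same cost).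

-- ===== PORT A =====
-- A works on Python strings; the port carries them as lists of characters and
-- wraps the result back into String at the end.
def genAChars : List Char → List (List Char)
  | [] => [[]]
  | first :: rest =>
    let rest_strings := genAChars rest
    -- result = list(rest_strings); for string in rest_strings: for idx in range(len(string)+1): result.append(string[:idx] + first + string[idx:])
    rest_strings.foldl
      (fun result string =>
        (PySem.List.pyRange 0 ((string.length : Int) + 1) 1).foldl
          (fun res idx =>
            res ++ [PySem.List.slice string none (some idx) ++ [first] ++
                    PySem.List.slice string (some idx) none])
          result)
      rest_strings

def gen_all_strings (word : String) : List String :=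
  (genAChars word.toList).map (fun cs => String.ofList cs)

-- ===== PORT B =====
-- current = current + [s[:i] + ch + s[i:] for s in current for i in range(len(s)+1)]
def genBStep (current : List (List Char)) (ch : Char) : List (List Char) :=
  current ++ current.flatMap (fun s =>
    (PySem.List.pyRange 0 ((s.length : Int) + 1) 1).map (fun i =>
      PySem.List.slice s none (some i) ++ [ch] ++ PySem.List.slice s (some i) none))

def gen_all_strings_alt (word : String) : List String :=
  (word.toList.reverse.foldl genBStep [[]]).map (fun cs => String.ofList cs)

-- ===== PRECONDITION & SPEC =====
def Spec_gen_all_strings (word : String) (out : List String) : Prop := out = gen_all_strings_alt word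
instance (word : String) (out : List String) : Decidable (Spec_gen_all_strings word out) := by unfold Spec_gen_all_strings; infer_instance

-- ===== CLAIM (what is proved, stated in full; the proofs are below) =====
def Claim_equal_gen_all_strings : Prop := ∀ (word : String), Dom_gen_all_strings word → Spec_gen_all_strings word (gen_all_strings word)

-- ===== LEMMAS AND PROOFS =====

-- A's nested append loop for one character equals B's single step.
lemma genAChars_cons (c : Char) (rest : List Char) :
    genAChars (c :: rest) = genBStep (genAChars rest) c := by
  simp only [genAChars, genBStep]
  rw [← PySem.List.foldl_append_eq_flatMap]
  apply List.foldl_ext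
  intro acc s _
  exact PySem.List.foldl_append_singleton_eq_map _ _ _

-- A's recursion is B's fold over the reversed character list.
lemma genAChars_eq_foldl_reverse (l : List Char) :
    genAChars l = l.reverse.foldl genBStep [[]] := by
  induction l with
  | nil => rfl
  | cons c rest ih =>
      rw [genAChars_cons, List.reverse_cons, List.foldl_append, ih]
      rfl

-- ===== VERDICT (by name: the statement is the Claim_ definition above) =====
theorem gen_all_strings_spec : Claim_equal_gen_all_strings := by
  intro word _
  unfold Spec_gen_all_strings gen_all_strings gen_all_strings_alt
  rw [genAChars_eq_foldl_reverse]
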